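-- pv_equiv track=rewrite | github.com/MrBrantCode/unitest_baseline | mut_generate/mist_train_taco/taco_5287/solution.py | determine_game_winners
-- ===== SOURCE A (Python) =====
-- def determine_game_winners(T, test_cases):
--     def hackenbush(i, p, g):
--         v = 0
--         for x in g[i]:
--             if x == p:
--                 continue
--             v = v ^ hackenbush(x, i, g) + 1
--         return v
--
--     results = []
--     for case in test_cases:
--         N, edges = case
--         g = {i: [] for i in range(1, N + 1)}
--         for (a, b) in edges:
--             g[a].append(b)
--             g[b].append(a)
--         if hackenbush(1, 0, g):
--             results.append('Alice')
--         else: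
--             results.append('Bob')
--     return results
-- ===== SOURCE B (Python) =====
-- def determine_game_winners(T, test_cases):
--     # Iterative DFS: the recursion is replaced by an explicit stack of frames
--     # (node, parent, pending, acc); a finished frame folds acc+1 into the frame below.
--     results = []
--     for N, edges in test_cases:
--         g = {i: [] for i in range(1, N + 1)}
--         for a, b in edges:
--             g[a].append(b)
--             g[b].append(a)
--         stack = [(1, 0, None, 0)]
--         answer = 0
--         while stack:
--             node, parent, pending, acc = stack.pop()
--             if pending is None:
--                 stack.append((node, parent, list(g[node]), 0))
--             elif pending:
--                 x, rest = pending[0], pending[1:]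
--                 stack.append((node, parent, rest, acc))
--                 if x != parent:
--                     stack.append((x, node, None, 0))
--             else:
--                 if stack:
--                     pn, pp, ppend, pacc = stack.pop()
--                     stack.append((pn, pp, ppend, pacc ^ (acc + 1)))
--                 else:
--                     answer = acc
--         results.append('Alice' if answer else 'Bob')
--     return results
-- ===== Notes on version B (the rewrite author's own statement) =====
-- stated objective: alternative
-- what changed: The recursive hackenbush DFS is replaced by an iterative explicit-stack machine: frames (node, parent, pending children, acc) are pushed and popped, and a finished subtree's Grundy value is XOR-folded as value+1 into the frame below, so no Python recursion (and no RecursionError on deep trees) is used.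
import Mathlib
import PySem

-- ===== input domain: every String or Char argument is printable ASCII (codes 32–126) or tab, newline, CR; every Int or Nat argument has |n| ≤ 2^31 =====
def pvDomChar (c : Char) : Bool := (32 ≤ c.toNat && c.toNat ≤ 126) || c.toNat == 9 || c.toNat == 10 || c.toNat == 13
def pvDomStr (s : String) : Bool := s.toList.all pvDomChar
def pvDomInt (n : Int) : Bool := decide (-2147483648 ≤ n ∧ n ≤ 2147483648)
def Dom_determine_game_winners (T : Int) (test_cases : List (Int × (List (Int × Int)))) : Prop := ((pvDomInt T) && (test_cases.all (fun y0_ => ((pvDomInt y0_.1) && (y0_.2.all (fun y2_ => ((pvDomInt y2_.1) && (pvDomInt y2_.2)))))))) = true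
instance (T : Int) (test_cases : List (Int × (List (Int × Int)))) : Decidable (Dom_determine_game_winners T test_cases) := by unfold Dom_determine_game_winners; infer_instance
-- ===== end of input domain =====

-- B replaces A's recursive DFS by an iterative explicit-stack machine (same cost); return values proved equal on Pre_.


-- ===== PORT A =====
-- g = {i: [] for i in range(1, N+1)}; then g[a].append(b); g[b].append(a).
-- (Python raises KeyError when an endpoint is not a key; the port uses getD [] there — such inputs are outside Pre_.)
def pvBuildG (N : Int) (edges : List (Int × Int)) : PySem.Dict Int (List Int) :=
  edges.foldl
    (fun d e =>
      let d1 := d.insert e.1 (d.getD e.1 [] ++ [e.2])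
      d1.insert e.2 (d1.getD e.2 [] ++ [e.1]))
    ((PySem.List.pyRange 1 (N + 1) 1).foldl (fun d i => d.insert i ([] : List Int)) PySem.Dict.empty)

-- the recursive hackenbush(i, p, g); `avail` (vertices not yet visited) is only a termination
-- guard — inside Pre_ (forest) the recursion never revisits a vertex, so the guard never fires.
def pvHackA (g : PySem.Dict Int (List Int)) (avail : List Int) (i p : Int) : Int :=
  if h : i ∈ avail then
    (g.getD i []).foldl (fun v x => if x = p then v else PySem.Int.bxor v (pvHackA g (avail.erase i) x i + 1)) 0
  else 0
termination_by avail.length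
decreasing_by
  rw [List.length_erase_of_mem h]
  exact Nat.sub_lt (List.length_pos_of_mem h) Nat.one_pos

def determine_game_winners (T : Int) (test_cases : List (Int × (List (Int × Int)))) : List String :=
  test_cases.foldl
    (fun results case =>
      let g := pvBuildG case.1 case.2
      results ++ [if pvHackA g (PySem.List.pyRange 1 (case.1 + 1) 1) 1 0 ≠ 0 then "Alice" else "Bob"])
    []

-- ===== PORT B =====
-- Stack frames of Source B: (node, parent, None, 0) is `eval` (the eval frame also carries the
-- termination-guard list `avail`, absent in Python), (node, parent, pending, acc) is `cont`.
inductive PvFrame where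
  | eval : List Int → Int → Int → PvFrame
  | cont : Int → Int → List Int → List Int → Int → PvFrame
deriving DecidableEq, Repr

-- total size of all adjacency lists (only used by the termination measure)
def pvDeg (g : PySem.Dict Int (List Int)) : Nat := (g.items.map (fun p => p.2.length)).sum

def pvF (L : Nat) : Nat → Nat
  | 0 => 2
  | a + 1 => L * (1 + pvF L a) + 2

def pvW (L : Nat) : PvFrame → Nat
  | .eval avail _ _ => pvF L avail.length
  | .cont _ _ a' pend _ => pend.length * (1 + pvF L a'.length) + 1

def pvMu (L : Nat) (s : List PvFrame) : Nat := (s.map (pvW L)).sum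

theorem pvF_pos (L a : Nat) : 0 < pvF L a := by
  cases a <;> simp [pvF]

theorem pvDeg_le (g : PySem.Dict Int (List Int)) (i : Int) :
    (g.getD i []).length ≤ pvDeg g := by
  rcases h : g.get? i with _ | v
  · rw [PySem.Dict.getD_eq_get?_getD, h]; exact Nat.zero_le _
  · rw [PySem.Dict.getD_eq_get?_getD, h]
    have hm : (i, v) ∈ g.items := PySem.Dict.mem_items_of_get?_eq_some (d := g) h
    have : v.length ∈ g.items.map (fun p => p.2.length) := List.mem_map_of_mem hm
    exact List.le_sum_of_mem this

-- the while loop of Source B: pop a frame, dispatch on its shape; `pvRet` is the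
-- "finished frame folds its value into the frame below" branch.
mutual
def pvExec (g : PySem.Dict Int (List Int)) : List PvFrame → Option Int
  | [] => none
  | .eval avail i p :: rest =>
      if h : i ∈ avail then
        pvExec g (.cont i p (avail.erase i) (g.getD i []) 0 :: rest)
      else pvRet g 0 rest
  | .cont i p a' (x :: pend) acc :: rest =>
      if x = p then pvExec g (.cont i p a' pend acc :: rest)
      else pvExec g (.eval a' x i :: .cont i p a' pend acc :: rest)
  | .cont _ _ _ [] acc :: rest => pvRet g acc rest
termination_by s => 2 * pvMu (pvDeg g) s + 1
decreasing_by
  · -- eval, guard true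
    simp only [pvMu, List.map, List.sum_cons, pvW]
    have h1 : avail.length = (avail.erase i).length + 1 := by
      rw [List.length_erase_of_mem h]
      have := List.length_pos_of_mem h
      omega
    have h2 := pvDeg_le g i
    rw [h1]
    simp only [pvF]
    have h3 := pvF_pos (pvDeg g) (avail.erase i).length
    have h4 := Nat.mul_le_mul_right (1 + pvF (pvDeg g) (avail.erase i).length) h2
    omega
  · -- eval, guard false
    simp only [pvMu, List.map, List.sum_cons, pvW]
    have := pvF_pos (pvDeg g) avail.length
    omega
  · -- cont skip
    simp only [pvMu, List.map, List.sum_cons, pvW, List.length_cons]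
    have := pvF_pos (pvDeg g) a'.length
    nlinarith
  · -- cont push child
    simp only [pvMu, List.map, List.sum_cons, pvW, List.length_cons]
    ring_nf
    omega
  · -- cont [] -> ret
    simp only [pvMu, List.map, List.sum_cons, pvW]
    omega

def pvRet (g : PySem.Dict Int (List Int)) (v : Int) : List PvFrame → Option Int
  | [] => some v
  | .cont i p a' pend acc :: rest =>
      pvExec g (.cont i p a' pend (PySem.Int.bxor acc (v + 1)) :: rest)
  | .eval avail i p :: rest => pvRet g v rest  -- unreachable from the initial stack of Source B
termination_by s => 2 * pvMu (pvDeg g) s + 2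
decreasing_by
  · -- ret into cont
    simp only [pvMu, List.map, List.sum_cons, pvW]
    omega
  · -- ret over eval
    simp only [pvMu, List.map, List.sum_cons, pvW]
    have := pvF_pos (pvDeg g) avail.length
    omega
end

def determine_game_winners_alt (T : Int) (test_cases : List (Int × (List (Int × Int)))) : List String :=
  test_cases.foldl
    (fun results case =>
      let g := pvBuildG case.1 case.2
      let answer := (pvExec g [.eval (PySem.List.pyRange 1 (case.1 + 1) 1) 1 0]).getD 0
      results ++ [if answer ≠ 0 then "Alice" else "Bob"])
    []

-- ===== PRECONDITION & SPEC =====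
-- vertices connected to 1 (iterated closure over the edge list)
def pvComp (edges : List (Int × Int)) : List Int :=
  (List.range (edges.length + 1)).foldl
    (fun comp _ =>
      edges.foldl
        (fun comp e =>
          if e.1 ∈ comp ∨ e.2 ∈ comp then PySem.Set.add (PySem.Set.add comp e.1) e.2 else comp)
        comp)
    [1]

-- union-find style acyclicity test on a list of distinct loop-free undirected edges
def pvForestStep (o : Option (List (List Int))) (e : Int × Int) : Option (List (List Int)) :=
  o.bind (fun comps =>
    match comps.find? (fun c => decide (e.1 ∈ c)), comps.find? (fun c => decide (e.2 ∈ c)) with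
    | none, none => some ([e.1, e.2] :: comps)
    | some ca, none => some ((e.2 :: ca) :: comps.erase ca)
    | none, some cb => some ((e.1 :: cb) :: comps.erase cb)
    | some ca, some cb => if ca = cb then none else some ((ca ++ cb) :: (comps.erase ca).erase cb))

-- A terminates on a case iff: the simple graph induced on the component of vertex 1 is acyclic
-- and carries at most one self-looped vertex (a lone self-loop only lets the DFS bounce once).
def pvCaseOk (N : Int) (edges : List (Int × Int)) : Bool :=
  let comp := pvComp edges
  let ce := (edges.filter (fun e => decide (e.1 ∈ comp) && decide (e.2 ∈ comp))).map
    (fun e => if e.1 ≤ e.2 then e else (e.2, e.1))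
  let loops := PySem.Set.ofList ((ce.filter (fun e => e.1 == e.2)).map (·.1))
  let simple := PySem.Set.ofList (ce.filter (fun e => e.1 != e.2))
  decide (loops.length ≤ 1) && (simple.foldl pvForestStep (some [])).isSome

-- Pre_ = exactly the inputs where Python A returns: N ≥ 1 and all endpoints in 1..N (otherwise
-- KeyError), and no unbounded non-backtracking walk from vertex 1 (otherwise RecursionError),
-- characterized per case by pvCaseOk.
def Pre_determine_game_winners (T : Int) (test_cases : List (Int × (List (Int × Int)))) : Prop :=
  ∀ c ∈ test_cases, 1 ≤ c.1 ∧ (∀ e ∈ c.2, 1 ≤ e.1 ∧ e.1 ≤ c.1 ∧ 1 ≤ e.2 ∧ e.2 ≤ c.1) ∧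
    pvCaseOk c.1 c.2 = true
instance (T : Int) (test_cases : List (Int × (List (Int × Int)))) : Decidable (Pre_determine_game_winners T test_cases) := by
  unfold Pre_determine_game_winners; infer_instance

def pvWitness_determine_game_winners : Int × (List (Int × (List (Int × Int)))) :=
  (1, [(3, [(1, 2), (2, 3)])])

def Spec_determine_game_winners (T : Int) (test_cases : List (Int × (List (Int × Int)))) (out : List String) : Prop := out = determine_game_winners_alt T test_cases
instance (T : Int) (test_cases : List (Int × (List (Int × Int)))) (out : List String) : Decidable (Spec_determine_game_winners T test_cases out) := by unfold Spec_determine_game_winners; infer_instance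

-- ===== CLAIM (what is proved, stated in full; the proofs are below) =====
def Claim_equal_determine_game_winners : Prop := ∀ (T : Int) (test_cases : List (Int × (List (Int × Int)))), Dom_determine_game_winners T test_cases → Pre_determine_game_winners T test_cases → Spec_determine_game_winners T test_cases (determine_game_winners T test_cases)

-- ===== LEMMAS AND PROOFS =====

-- the stack machine is the defunctionalized hackenbush recursion: evaluating an `eval` frame
-- returns pvHackA of it to the rest of the stack (holds for EVERY graph, Pre_ not needed).
theorem pvExec_eval (g : PySem.Dict Int (List Int)) :
    ∀ (n : Nat) (avail : List Int), avail.length ≤ n → ∀ (i p : Int) (rest : List PvFrame),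
      pvExec g (.eval avail i p :: rest) = pvRet g (pvHackA g avail i p) rest := by
  intro n
  induction n with
  | zero =>
      intro avail hlen i p rest
      have hav : avail = [] := List.eq_nil_of_length_eq_zero (Nat.le_zero.mp hlen)
      subst hav
      rw [pvExec, pvHackA]
      simp
  | succ n ih =>
      intro avail hlen i p rest
      rw [pvExec, pvHackA]
      by_cases h : i ∈ avail
      · rw [dif_pos h, dif_pos h]
        have hlen' : (avail.erase i).length ≤ n := by
          rw [List.length_erase_of_mem h]
          have := List.length_pos_of_mem h
          omega
        have inner : ∀ (pending : List Int) (acc : Int) (rest' : List PvFrame),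
            pvExec g (.cont i p (avail.erase i) pending acc :: rest') =
              pvRet g (pending.foldl
                (fun v x => if x = p then v else PySem.Int.bxor v (pvHackA g (avail.erase i) x i + 1)) acc) rest' := by
          intro pending
          induction pending with
          | nil => intro acc rest'; rw [pvExec, List.foldl_nil]
          | cons x pend ihp =>
              intro acc rest'
              rw [pvExec, List.foldl_cons]
              by_cases hx : x = p
              · rw [if_pos hx, if_pos hx, ihp]
              · rw [if_neg hx, if_neg hx, ih (avail.erase i) hlen' x i _, pvRet, ihp]
        exact inner (g.getD i []) 0 rest
      · rw [dif_neg h, dif_neg h]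

theorem pvExec_top (g : PySem.Dict Int (List Int)) (avail : List Int) (i p : Int) :
    (pvExec g [.eval avail i p]).getD 0 = pvHackA g avail i p := by
  rw [pvExec_eval g avail.length avail le_rfl i p [], pvRet]
  rfl

theorem pv_unconditional (T : Int) (test_cases : List (Int × (List (Int × Int)))) :
    determine_game_winners T test_cases = determine_game_winners_alt T test_cases := by
  unfold determine_game_winners determine_game_winners_alt
  induction test_cases using List.reverseRecOn with
  | nil => rfl
  | append_singleton tc c ih =>
      simp only [List.foldl_append, List.foldl_cons, List.foldl_nil, ih, pvExec_top]

-- ===== VERDICT (by name: the statement is the Claim_ definition above) =====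
theorem determine_game_winners_spec : Claim_equal_determine_game_winners := by
  intro T tc _ _
  unfold Spec_determine_game_winners
  exact pv_unconditional T tc
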